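-- pv_equiv track=rewrite | github.com/bigint405/CoMPI | model_merge/model_merger.py | split_vertical
-- ===== SOURCE A (Python) =====
-- def split_vertical(n: int, l: list[int]) -> int:
--     best_diff = float('inf')
--     best_index = -1
--
--     left_count = 0
--     i = 0
--
--     while i < n:
--         curr = l[i]
--         start = i
--         while i + 1 < n and l[i + 1] == curr:
--             i += 1
--         end = i
--         block_size = end - start + 1
--
--         left_count += block_size
--         right_count = n - left_count
--
--         if i + 1 < n:
--             diff = abs(left_count - right_count)
--             if diff < best_diff:
--                 best_diff = diff
--                 best_index = i + 1
--             else: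
--                 break
--         i += 1
--
--     # 特判全等：直接在中点划分
--     if best_index == -1:
--         best_index = n // 2
--     return best_index
-- ===== SOURCE B (Python) =====
-- from itertools import groupby
--
-- def split_vertical(n: int, l: list[int]) -> int:
--     # build cumulative boundary table of the equal-value blocks of l[:n]
--     cuts = []
--     left = 0
--     for _, g in groupby(l[:max(0, n)]):
--         left += sum(1 for _ in g)
--         cuts.append(left)
--     interior = cuts[:-1]  # the boundary after the last block is not a cut
--     if not interior:
--         return n // 2
--     return min(interior, key=lambda c: abs(2 * c - n))
-- ===== Notes on version B (the rewrite author's own statement) =====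
-- stated objective: alternative
-- what changed: A's fused index-walking while-loop with early break is replaced by a build-then-scan decomposition: first build the table of cumulative block boundaries of l[:n] (via itertools.groupby), then a separate pass picks the first interior boundary minimising abs(2*left-n), with n//2 when there is no interior boundary.
-- outside the precondition, e.g. on split_vertical(5, [1, 2, 3, 4]): A returns 2, B returns 2; on split_vertical(1, []): A raises IndexError, B returns 0
import Mathlib
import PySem

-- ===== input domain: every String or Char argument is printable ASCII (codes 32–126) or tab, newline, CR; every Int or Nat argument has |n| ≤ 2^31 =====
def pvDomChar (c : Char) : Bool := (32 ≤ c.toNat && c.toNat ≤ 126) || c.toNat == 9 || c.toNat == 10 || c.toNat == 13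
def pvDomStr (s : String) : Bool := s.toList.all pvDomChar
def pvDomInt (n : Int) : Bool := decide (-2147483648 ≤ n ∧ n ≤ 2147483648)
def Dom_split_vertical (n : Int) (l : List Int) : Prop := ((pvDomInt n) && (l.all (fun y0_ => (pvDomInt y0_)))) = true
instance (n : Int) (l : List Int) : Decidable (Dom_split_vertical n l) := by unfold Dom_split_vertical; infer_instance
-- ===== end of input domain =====

-- B replaces A's fused scan-with-early-break by a build-then-scan decomposition (build the
-- table of block boundaries of l[:n], then pick the first boundary minimising the imbalance);
-- objective: alternative (same O(n) cost, different decomposition).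

-- ===== PORT A =====

-- the `while i + 1 < n and l[i + 1] == curr: i += 1` inner loop
def svSkip (n : Int) (l : List Int) (curr i : Int) : Int :=
  if h : i + 1 < n ∧ PySem.List.pyGet? l (i + 1) = some curr then
    svSkip n l curr (i + 1)
  else i
termination_by (n - i).toNat
decreasing_by have := h.1; omega

-- `i ≤ svSkip …` is needed by the outer loop's termination argument
theorem svSkip_ge (n : Int) (l : List Int) (curr i : Int) : i ≤ svSkip n l curr i := by
  fun_induction svSkip n l curr i <;> omega

-- the final `if best_index == -1: best_index = n // 2; return best_index`
def svFin (n bi : Int) : Int := if bi = -1 then PySem.Int.floordiv n 2 else bi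

-- the outer while loop; state = (i, left_count, best_index, best_diff), best_diff none = inf
def svLoop (n : Int) (l : List Int) (i left bi : Int) (bd : Option Int) : Int :=
  if hi : i < n then
    let curr := (PySem.List.pyGet? l i).getD 0
    let i' := svSkip n l curr i
    let left' := left + (i' - i + 1)
    if i' + 1 < n then
      let diff := |left' - (n - left')|
      if bd.all (fun b => decide (diff < b)) then
        svLoop n l (i' + 1) left' (i' + 1) (some diff)
      else svFin n bi
    else svFin n bi
  else svFin n bi
termination_by (n - i).toNat
decreasing_by have := svSkip_ge n l ((PySem.List.pyGet? l i).getD 0) i; omega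

def split_vertical (n : Int) (l : List Int) : Int := svLoop n l 0 0 (-1) none

-- ===== PORT B =====

-- the `for _, g in groupby(…): left += size; cuts.append(left)` loop of Source B
def svCuts (left : Int) : List Int → List Int
  | [] => []
  | x :: xs =>
    let r := (xs.takeWhile (· == x)).length + 1
    (left + (r : Int)) :: svCuts (left + (r : Int)) (xs.dropWhile (· == x))
termination_by ys => ys.length
decreasing_by simp only [List.length_cons]; have := List.length_dropWhile_le (· == x) xs; omega

def split_vertical_alt (n : Int) (l : List Int) : Int :=
  let xs := PySem.List.slice l none (some (max 0 n))
  match (svCuts 0 xs).dropLast with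
  | [] => PySem.Int.floordiv n 2
  | c :: cs => cs.foldl (fun best c => if |2 * c - n| < |2 * best - n| then c else best) c

-- ===== PRECONDITION & SPEC =====
-- Pre_ excludes n > len(l): there A indexes l past its end and raises IndexError (except the
-- rare runs where an early break preempts the read).
def Pre_split_vertical (n : Int) (l : List Int) : Prop := n ≤ (l.length : Int)
instance (n : Int) (l : List Int) : Decidable (Pre_split_vertical n l) := by
  unfold Pre_split_vertical; infer_instance

def pvWitness_split_vertical : Int × List Int := (4, [1, 1, 2, 3])

def Spec_split_vertical (n : Int) (l : List Int) (out : Int) : Prop := out = split_vertical_alt n l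
instance (n : Int) (l : List Int) (out : Int) : Decidable (Spec_split_vertical n l out) := by
  unfold Spec_split_vertical; infer_instance

-- ===== CLAIM (what is proved, stated in full; the proofs are below) =====
def Claim_equal_split_vertical : Prop := ∀ (n : Int) (l : List Int), Dom_split_vertical n l →
  Pre_split_vertical n l → Spec_split_vertical n l (split_vertical n l)

-- ===== LEMMAS AND PROOFS =====

-- abstract break-scan over the boundary table (A's control flow, freed from indices)
def svBscan (n : Int) : List Int → Int → Option Int → Int
  | [], bi, _ => svFin n bi
  | c :: cs, bi, bd =>
    if bd.all (fun b => decide (|2 * c - n| < b)) then svBscan n cs c (some |2 * c - n|)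
    else svFin n bi

theorem svCuts_eq_nil (a : Int) (ys : List Int) : svCuts a ys = [] ↔ ys = [] := by
  cases ys <;> simp [svCuts]

theorem svCuts_gt (ys : List Int) (a : Int) : ∀ c ∈ svCuts a ys, a < c := by
  fun_induction svCuts a ys with
  | case1 => simp
  | case2 a x xs r ih =>
    intro c hc
    rcases List.mem_cons.1 hc with h | h
    · omega
    · have := ih c h; omega

theorem svCuts_pairwise (ys : List Int) (a : Int) : (svCuts a ys).Pairwise (· < ·) := by
  fun_induction svCuts a ys with
  | case1 => simp
  | case2 a x xs r ih =>
    refine List.pairwise_cons.2 ⟨?_, ih⟩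
    intro c hc
    exact svCuts_gt _ _ c hc

theorem svArith (n c d e : Int) (hcd : c < d) (hde : d ≤ e)
    (h : ¬ |2 * d - n| < |2 * c - n|) : ¬ |2 * e - n| < |2 * c - n| := by
  rcases abs_cases (2 * d - n) with ⟨h1, h2⟩ | ⟨h1, h2⟩ <;>
  rcases abs_cases (2 * c - n) with ⟨h3, h4⟩ | ⟨h3, h4⟩ <;>
  rcases abs_cases (2 * e - n) with ⟨h5, h6⟩ | ⟨h5, h6⟩ <;> omega

theorem svFoldl_const (n c : Int) (L : List Int)
    (h : ∀ e ∈ L, ¬ |2 * e - n| < |2 * c - n|) :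
    L.foldl (fun best c => if |2 * c - n| < |2 * best - n| then c else best) c = c := by
  induction L with
  | nil => rfl
  | cons d ds ih =>
    simp only [List.foldl_cons, if_neg (h d (List.mem_cons_self))]
    exact ih (fun e he => h e (List.mem_cons_of_mem _ he))

theorem svBscan_foldl (n : Int) (cs : List Int) : ∀ c : Int, 0 < c →
    (c :: cs).Pairwise (· < ·) →
    svBscan n cs c (some |2 * c - n|) =
      cs.foldl (fun best c => if |2 * c - n| < |2 * best - n| then c else best) c := by
  induction cs with
  | nil =>
    intro c hc _
    simp only [svBscan, svFin, List.foldl_nil]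
    rw [if_neg (by omega)]
  | cons d ds ih =>
    intro c hc hp
    have hcd : c < d := (List.pairwise_cons.1 hp).1 d (List.mem_cons_self)
    have hp' : (d :: ds).Pairwise (· < ·) := (List.pairwise_cons.1 hp).2
    by_cases h : |2 * d - n| < |2 * c - n|
    · simp only [svBscan, Option.all_some, decide_eq_true_eq, List.foldl_cons, if_pos h]
      exact ih d (by omega) hp'
    · simp only [svBscan, Option.all_some, decide_eq_true_eq, List.foldl_cons, if_neg h, svFin]
      rw [if_neg (by omega)]
      refine (svFoldl_const n c ds ?_).symm
      intro e he
      have hde : d < e := (List.pairwise_cons.1 hp').1 e he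
      exact svArith n c d e hcd (le_of_lt hde) h

theorem svDropWhile_eq_drop (p : Int → Bool) (ys : List Int) :
    ys.dropWhile p = ys.drop (ys.takeWhile p).length := by
  induction ys with
  | nil => rfl
  | cons x xs ih => by_cases h : p x <;> simp [h, ih]

theorem svSkip_eq (n : Int) (l : List Int) (curr : Int) (hn : n.toNat ≤ l.length) :
    ∀ m (k : Nat), n.toNat - k = m → (k : Int) < n →
    svSkip n l curr (k : Int) =
      (k : Int) + (((l.take n.toNat).drop (k + 1)).takeWhile (· == curr)).length := by
  intro m
  induction m using Nat.strong_induction_on with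
  | _ m ih =>
    intro k hm hk
    have hT : (l.take n.toNat).length = n.toNat := by
      rw [List.length_take]; omega
    rw [svSkip]
    by_cases h1 : (k : Int) + 1 < n
    · have hk1 : k + 1 < n.toNat := by omega
      have hk1l : k + 1 < l.length := by omega
      have hget : PySem.List.pyGet? l ((k : Int) + 1) = some l[k + 1] := by
        have : ((k : Int) + 1) = ((k + 1 : Nat) : Int) := by push_cast; ring
        rw [this, PySem.List.pyGet?_natCast, List.getElem?_eq_getElem hk1l]
      have hdrop : (l.take n.toNat).drop (k + 1) =
          (l.take n.toNat)[k + 1]'(by omega) :: (l.take n.toNat).drop (k + 2) :=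
        List.drop_eq_getElem_cons (by omega)
      have hTel : (l.take n.toNat)[k + 1]'(by omega) = l[k + 1] := List.getElem_take
      by_cases h2 : l[k + 1] = curr
      · rw [dif_pos ⟨h1, by rw [hget, h2]⟩]
        have hrec : ((k : Int) + 1) = ((k + 1 : Nat) : Int) := by push_cast; ring
        rw [hrec, ih (m - 1) (by omega) (k + 1) (by omega) (by push_cast; omega)]
        rw [hdrop, hTel, List.takeWhile_cons, if_pos (by simp [h2])]
        simp only [List.length_cons]
        push_cast
        ring
      · rw [dif_neg (by rintro ⟨-, hc⟩; rw [hget] at hc; exact h2 (Option.some.inj hc))]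
        rw [hdrop, hTel, List.takeWhile_cons, if_neg (by simp [h2])]
        simp
    · rw [dif_neg (by rintro ⟨hc, -⟩; exact h1 hc)]
      have : (l.take n.toNat).drop (k + 1) = [] := by
        apply List.drop_eq_nil_of_le; omega
      rw [this]
      simp

theorem svLoop_eq (n : Int) (l : List Int) (hn : n.toNat ≤ l.length) :
    ∀ m (k : Nat), n.toNat - k = m → ∀ (bi : Int) (bd : Option Int),
    svLoop n l (k : Int) (k : Int) bi bd =
      svBscan n ((svCuts (k : Int) ((l.take n.toNat).drop k)).dropLast) bi bd := by
  intro m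
  induction m using Nat.strong_induction_on with
  | _ m ih =>
    intro k hm bi bd
    have hT : (l.take n.toNat).length = n.toNat := by
      rw [List.length_take]; omega
    rw [svLoop]
    by_cases hk : (k : Int) < n
    · rw [dif_pos hk]
      have hkn : k < n.toNat := by omega
      have hkl : k < l.length := by omega
      have hcurr : (PySem.List.pyGet? l (k : Int)).getD 0 = l[k] := by
        rw [PySem.List.pyGet?_natCast, List.getElem?_eq_getElem hkl, Option.getD_some]
      have hdrop : (l.take n.toNat).drop k =
          (l.take n.toNat)[k]'(by omega) :: (l.take n.toNat).drop (k + 1) :=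
        List.drop_eq_getElem_cons (by omega)
      have hTel : (l.take n.toNat)[k]'(by omega) = l[k] := List.getElem_take
      set t := (((l.take n.toNat).drop (k + 1)).takeWhile (· == l[k])).length with ht
      have hskip : svSkip n l l[k] (k : Int) = (k : Int) + (t : Int) :=
        svSkip_eq n l l[k] hn m k hm hk
      have hcuts : svCuts (k : Int) ((l.take n.toNat).drop k) =
          ((k : Int) + ((t + 1 : Nat) : Int)) ::
            svCuts ((k : Int) + ((t + 1 : Nat) : Int)) ((l.take n.toNat).drop (k + (t + 1))) := by
        rw [hdrop, svCuts, hTel]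
        have hdw : ((l.take n.toNat).drop (k + 1)).dropWhile (· == l[k]) =
            (l.take n.toNat).drop (k + (t + 1)) := by
          rw [svDropWhile_eq_drop, ← ht, List.drop_drop]
          congr 1
          omega
        rw [hdw]
      simp only [hcurr, hskip]
      have hleft : (k : Int) + ((k : Int) + (t : Int) - (k : Int) + 1) = ((k + (t + 1) : Nat) : Int) := by
        push_cast; ring
      by_cases h2 : (k : Int) + (t : Int) + 1 < n
      · rw [if_pos h2]
        have hkr : k + (t + 1) < n.toNat := by omega
        have hne : (l.take n.toNat).drop (k + (t + 1)) ≠ [] := by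
          intro hc
          have := congrArg List.length hc
          simp [hT] at this
          omega
        have hne2 : svCuts ((k : Int) + ((t + 1 : Nat) : Int)) ((l.take n.toNat).drop (k + (t + 1))) ≠ [] := by
          rw [Ne, svCuts_eq_nil]; exact hne
        rw [hcuts, List.dropLast_cons_of_ne_nil hne2]
        have habs : |(k : Int) + ((k : Int) + (t : Int) - (k : Int) + 1) -
            (n - ((k : Int) + ((k : Int) + (t : Int) - (k : Int) + 1)))| =
            |2 * ((k : Int) + ((t + 1 : Nat) : Int)) - n| := by
          congr 1; push_cast; ring
        rw [svBscan, habs]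
        by_cases hb : bd.all (fun b => decide (|2 * ((k : Int) + ((t + 1 : Nat) : Int)) - n| < b))
        · rw [if_pos hb, if_pos hb]
          have e1 : (k : Int) + (t : Int) + 1 = ((k + (t + 1) : Nat) : Int) := by push_cast; ring
          have e2 : (k : Int) + ((t + 1 : Nat) : Int) = ((k + (t + 1) : Nat) : Int) := by push_cast; ring
          rw [hleft, e1, e2]
          exact ih (n.toNat - (k + (t + 1))) (by omega) (k + (t + 1)) rfl _ _
        · rw [if_neg hb, if_neg hb]
      · rw [if_neg h2]
        have hnil : (l.take n.toNat).drop (k + (t + 1)) = [] := by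
          apply List.drop_eq_nil_of_le; omega
        rw [hcuts, hnil]
        simp [svCuts, svBscan]
    · rw [dif_neg hk]
      have : (l.take n.toNat).drop k = [] := by
        apply List.drop_eq_nil_of_le; omega
      rw [this]
      simp [svCuts, svBscan]

-- ===== VERDICT (by name: the statement is the Claim_ definition above) =====
theorem split_vertical_spec : Claim_equal_split_vertical := by
  intro n l _ hpre
  unfold Spec_split_vertical split_vertical split_vertical_alt Pre_split_vertical at *
  by_cases hn : 0 < n
  · have hmax : max 0 n = n := by omega
    have hslice : PySem.List.slice l none (some (max 0 n)) = l.take n.toNat := by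
      rw [hmax, PySem.List.slice_to l (le_of_lt hn)]
    have hlen : n.toNat ≤ l.length := by omega
    have h0 : (0 : Int) = ((0 : Nat) : Int) := rfl
    have hA : svLoop n l 0 0 (-1) none =
        svBscan n ((svCuts 0 (l.take n.toNat)).dropLast) (-1) none := by
      have := svLoop_eq n l hlen n.toNat 0 (by omega) (-1) none
      simpa using this
    simp only [hslice]
    cases hC : (svCuts 0 (l.take n.toNat)).dropLast with
    | nil => rw [hA, hC]; simp [svBscan, svFin]
    | cons c cs =>
      have hc0 : 0 < c := by
        have hmem : c ∈ svCuts (0 : Int) (l.take n.toNat) :=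
          List.mem_of_mem_dropLast (by rw [hC]; exact List.mem_cons_self)
        exact svCuts_gt _ _ c hmem
      have hpw : (c :: cs).Pairwise (· < ·) := by
        rw [← hC]
        exact (svCuts_pairwise _ _).sublist (List.dropLast_sublist _)
      rw [hA, hC]
      simpa [svBscan] using svBscan_foldl n cs c hc0 hpw
  · rw [svLoop]
    rw [dif_neg (by omega)]
    have hmax : max 0 n = 0 := by omega
    rw [hmax]
    have : PySem.List.slice l none (some (0 : Int)) = [] := by
      rw [PySem.List.slice_to l le_rfl]
      simp
    rw [this]
    simp [svCuts, svFin]
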